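-- pv_equiv track=rewrite | github.com/terassyi/algorithm | atcoder_typical90/base_8_to_9/solve.py | base_10_to_9
-- ===== SOURCE A (Python) =====
-- def base_10_to_9(num):
-- 	s = ""
-- 	while True:
-- 		if num < 9:
-- 			if num == 8:
-- 				num = 5
-- 			s = str(num) + s
-- 			break
-- 		a = num % 9
-- 		if a == 8:
-- 			a = 5
-- 		num = num // 9
-- 		s = str(a) + s
-- 	return int(s)
-- ===== SOURCE B (Python) =====
-- def base_10_to_9(num):
--     # Single base-9 digit: just remap 8 -> 5, no string round-trip needed.
--     if num < 9:
--         return 5 if num == 8 else num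
--     # Most-significant-digit-first conversion with a pure integer accumulator:
--     # find the largest power of 9 not exceeding num, then peel digits from the
--     # top, remapping 8 -> 5 on the fly. No strings are built at any point.
--     p = 1
--     while p * 9 <= num:
--         p *= 9
--     r = 0
--     n = num
--     while p > 0:
--         d = n // p
--         n = n % p
--         r = r * 10 + (5 if d == 8 else d)
--         p //= 9
--     return r
-- ===== Notes on version B (the rewrite author's own statement) =====
-- stated objective: alternative
-- what changed: B replaces A's string-building least-significant-first loop (prepend str(digit), final int(s)) by a most-significant-digit-first arithmetic conversion: it finds the largest power of 9 not exceeding num and peels digits from the top into a pure integer accumulator r = r*10 + digit, never touching strings; small inputs (num < 9) are returned arithmetically.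
import Mathlib
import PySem

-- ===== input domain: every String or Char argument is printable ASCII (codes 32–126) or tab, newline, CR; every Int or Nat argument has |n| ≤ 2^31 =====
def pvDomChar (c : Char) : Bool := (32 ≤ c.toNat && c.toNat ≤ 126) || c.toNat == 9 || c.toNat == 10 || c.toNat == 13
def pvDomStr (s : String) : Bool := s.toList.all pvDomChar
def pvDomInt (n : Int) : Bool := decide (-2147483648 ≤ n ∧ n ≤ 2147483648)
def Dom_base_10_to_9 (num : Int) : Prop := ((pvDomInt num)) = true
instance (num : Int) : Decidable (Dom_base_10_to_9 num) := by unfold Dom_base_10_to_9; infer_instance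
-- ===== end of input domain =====

-- B replaces A's string-building least-significant-first loop by a most-significant-digit-first
-- arithmetic conversion (largest power of 9 first, integer accumulator, no strings).

-- ===== PORT A =====
-- the 'while True' loop of A: state is (num, s); breaks when num < 9
def pyALoop (num : Int) (s : List Char) : List Char :=
  if num < 9 then
    PySem.Int.toChars (if num = 8 then 5 else num) ++ s
  else
    pyALoop (PySem.Int.floordiv num 9)
      (PySem.Int.toChars (if PySem.Int.mod num 9 = 8 then 5 else PySem.Int.mod num 9) ++ s)
termination_by num.toNat
decreasing_by
  simp only [PySem.Int.floordiv, Int.fdiv_eq_ediv]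
  omega

def base_10_to_9 (num : Int) : Int :=
  (PySem.Int.ofChars? (pyALoop num [])).getD 0   -- int(s); the built digit string always parses

-- ===== PORT B =====
-- B's 'while p * 9 <= num: p *= 9' loop; the 0 < p invariant is carried as a hypothesis
def pyBPow (num p : Int) (hp : 0 < p) : Int :=
  if p * 9 ≤ num then pyBPow num (p * 9) (by omega) else p
termination_by (num + 1 - p).toNat
decreasing_by omega

-- B's 'while p > 0' loop peeling digits from the most significant end into the accumulator r
def pyBGo (n p r : Int) : Int :=
  if 0 < p then
    pyBGo (PySem.Int.mod n p) (PySem.Int.floordiv p 9)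
      (r * 10 + (if PySem.Int.floordiv n p = 8 then 5 else PySem.Int.floordiv n p))
  else r
termination_by p.toNat
decreasing_by
  simp only [PySem.Int.floordiv, Int.fdiv_eq_ediv]
  omega

def base_10_to_9_alt (num : Int) : Int :=
  if num < 9 then (if num = 8 then 5 else num)
  else pyBGo num (pyBPow num 1 (by norm_num)) 0

-- ===== PRECONDITION & SPEC =====
def Spec_base_10_to_9 (num : Int) (out : Int) : Prop := out = base_10_to_9_alt num
instance (num : Int) (out : Int) : Decidable (Spec_base_10_to_9 num out) := by unfold Spec_base_10_to_9; infer_instance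

-- ===== CLAIM (what is proved, stated in full; the proofs are below) =====
def Claim_equal_base_10_to_9 : Prop := ∀ (num : Int), Dom_base_10_to_9 num → Spec_base_10_to_9 num (base_10_to_9 num)

-- ===== LEMMAS AND PROOFS =====

-- adapters for '//' and '%' with a positive divisor (cite the PySem bridge lemmas)
theorem fdivP (a b : Int) (hb : 0 < b) : PySem.Int.floordiv a b = a / b := by
  simp [PySem.Int.floordiv_eq_ediv_of_pos, hb]

theorem fmodP (a b : Int) (hb : 0 < b) : PySem.Int.mod a b = a % b := by
  simp [PySem.Int.mod_eq_emod_of_pos, hb]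

-- the value A's loop is computing: LSB-first recursion, digit 8 remapped to 5
def specF (n : Int) : Int :=
  if n < 9 then (if n = 8 then 5 else n)
  else specF (n / 9) * 10 + (if n % 9 = 8 then 5 else n % 9)
termination_by n.toNat
decreasing_by omega

-- the digit string A's loop builds
def Astr (n : Int) : List Char :=
  if n < 9 then PySem.Int.toChars (if n = 8 then 5 else n)
  else Astr (n / 9) ++ PySem.Int.toChars (if n % 9 = 8 then 5 else n % 9)
termination_by n.toNat
decreasing_by omega

-- ---------- public replica of PySem's private int(s) digit parser ----------
def myDVgo : List Char → Bool → Nat → Option Nat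
  | [], afterDigit, acc => if afterDigit = true then some acc else none
  | c :: rest, afterDigit, acc =>
    if c.isDigit = true then myDVgo rest true (acc * 10 + (c.toNat - '0'.toNat))
    else
      if c = '_' ∧ afterDigit = true then
        match rest with
        | d :: _ => if d.isDigit = true then myDVgo rest false acc else none
        | [] => none
      else none

def myDV? : List Char → Option Nat
  | [] => none
  | cs => myDVgo cs false 0

def myOfChars? (s : List Char) : Option Int :=
  have cs := (List.dropWhile PySem.Int.isIntSpace (List.dropWhile PySem.Int.isIntSpace s).reverse).reverse
  match cs with
  | '-' :: ds => Option.map (fun n => -n) (do let a ← myDV? ds; pure ((a : Int)))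
  | '+' :: ds => Option.map (fun n => n) (do let a ← myDV? ds; pure ((a : Int)))
  | ds => Option.map (fun n => n) (do let a ← myDV? ds; pure ((a : Int)))

-- wrappers used to extract PySem's private parser pieces by unification
def wrapOuter (F : List Char → Option Nat) (s : List Char) : Option Int :=
  have cs := (List.dropWhile PySem.Int.isIntSpace (List.dropWhile PySem.Int.isIntSpace s).reverse).reverse
  match cs with
  | '-' :: ds => Option.map (fun n => -n) (do let a ← F ds; pure ((a : Int)))
  | '+' :: ds => Option.map (fun n => n) (do let a ← F ds; pure ((a : Int)))
  | ds => Option.map (fun n => n) (do let a ← F ds; pure ((a : Int)))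

def wrapDV (g : List Char → Bool → Nat → Option Nat) : List Char → Option Nat
  | [] => none
  | cs => g cs false 0

-- any function satisfying the digit-parser recurrences is myDVgo
theorem go_unique (g : List Char → Bool → Nat → Option Nat)
    (hnil : ∀ b acc, g [] b acc = if b = true then some acc else none)
    (hcons : ∀ c rest b acc, g (c :: rest) b acc =
      if c.isDigit = true then g rest true (acc * 10 + (c.toNat - '0'.toNat))
      else if c = '_' ∧ b = true then
        (match rest with
         | d :: _ => if d.isDigit = true then g rest false acc else none
         | [] => none)
      else none) : g = myDVgo := by
  funext cs
  induction cs with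
  | nil => funext b acc; rw [hnil]; rfl
  | cons c rest ih =>
    funext b acc
    rw [hcons, ih]
    rfl

theorem ofChars?_eq_my : PySem.Int.ofChars? = myOfChars? := by
  with_unfolding_all refine congrArg wrapOuter ?_
  with_unfolding_all refine congrArg wrapDV ?_
  refine go_unique _ ?_ ?_
  · intro b acc; with_unfolding_all rfl
  · intro c rest b acc; with_unfolding_all rfl

theorem myDVgo_digits (cs : List Char) (acc : Nat)
    (h : ∀ c ∈ cs, c.isDigit = true) :
    myDVgo cs true acc = some (cs.foldl (fun a c => a * 10 + (c.toNat - '0'.toNat)) acc) := by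
  induction cs generalizing acc with
  | nil => simp [myDVgo]
  | cons c rest ih =>
    have hc : c.isDigit = true := h c (List.mem_cons_self)
    simp only [myDVgo, hc, if_true, List.foldl_cons]
    exact ih _ (fun d hd => h d (List.mem_cons_of_mem _ hd))

theorem myDVgo_digits_start (cs : List Char) (b : Bool)
    (hne : cs ≠ []) (h : ∀ c ∈ cs, c.isDigit = true) :
    myDVgo cs b 0 = some (cs.foldl (fun a c => a * 10 + (c.toNat - '0'.toNat)) 0) := by
  cases cs with
  | nil => exact absurd rfl hne
  | cons c rest =>
    have hc : c.isDigit = true := h c (List.mem_cons_self)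
    simp only [myDVgo, hc, if_true, List.foldl_cons]
    exact myDVgo_digits rest _ (fun d hd => h d (List.mem_cons_of_mem _ hd))

theorem digitChar_spec (m : Nat) (hm : m < 10) :
    (Nat.digitChar m).isDigit = true ∧ (Nat.digitChar m).toNat - '0'.toNat = m ∧
      PySem.Int.isIntSpace (Nat.digitChar m) = false := by
  interval_cases m <;> exact ⟨rfl, rfl, rfl⟩

theorem toDigitsCore_spec (f : Nat) : ∀ (n : Nat) (acc : List Char), n < f →
    ∃ ds, Nat.toDigitsCore 10 f n acc = ds ++ acc ∧ ds ≠ [] ∧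
      (∀ c ∈ ds, c.isDigit = true) ∧
      ds.foldl (fun a c => a * 10 + (c.toNat - '0'.toNat)) 0 = n := by
  induction f with
  | zero => intro n acc h; omega
  | succ f ih =>
    intro n acc h
    rw [Nat.toDigitsCore]
    by_cases h10 : n / 10 = 0
    · refine ⟨[Nat.digitChar (n % 10)], by simp [h10], by simp, ?_, ?_⟩
      · intro c hc
        rw [List.mem_singleton] at hc; subst hc
        exact (digitChar_spec _ (Nat.mod_lt _ (by omega))).1
      · have hv := (digitChar_spec (n % 10) (Nat.mod_lt _ (by omega))).2.1
        simp only [List.foldl_cons, List.foldl_nil, Nat.zero_mul, Nat.zero_add]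
        rw [hv]; omega
    · obtain ⟨ds, heq, hne, hdig, hval⟩ := ih (n / 10) (Nat.digitChar (n % 10) :: acc) (by omega)
      refine ⟨ds ++ [Nat.digitChar (n % 10)], ?_, by simp, ?_, ?_⟩
      · simp [h10, heq]
      · intro c hc
        rcases List.mem_append.1 hc with hc | hc
        · exact hdig c hc
        · rw [List.mem_singleton] at hc; subst hc
          exact (digitChar_spec _ (Nat.mod_lt _ (by omega))).1
      · have hv := (digitChar_spec (n % 10) (Nat.mod_lt _ (by omega))).2.1
        rw [List.foldl_append, hval]
        simp only [List.foldl_cons, List.foldl_nil]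
        rw [hv]; omega

theorem toDigits_spec (n : Nat) :
    Nat.toDigits 10 n ≠ [] ∧ (∀ c ∈ Nat.toDigits 10 n, c.isDigit = true) ∧
      myDV? (Nat.toDigits 10 n) = some n := by
  obtain ⟨ds, heq, hne, hdig, hval⟩ := toDigitsCore_spec (n + 1) n [] (by omega)
  rw [Nat.toDigits, heq, List.append_nil]
  refine ⟨hne, hdig, ?_⟩
  cases ds with
  | nil => exact absurd rfl hne
  | cons c rest =>
    have h0 : myDV? (c :: rest) = myDVgo (c :: rest) false 0 := rfl
    rw [h0, myDVgo_digits_start _ _ (by simp) hdig, hval]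

theorem no_space_strip (l : List Char) (h : ∀ c ∈ l, PySem.Int.isIntSpace c = false) :
    (List.dropWhile PySem.Int.isIntSpace (List.dropWhile PySem.Int.isIntSpace l).reverse).reverse = l := by
  have h1 : List.dropWhile PySem.Int.isIntSpace l = l := by
    cases l with
    | nil => rfl
    | cons c t => rw [List.dropWhile_cons_of_neg (by simp [h c List.mem_cons_self])]
  rw [h1]
  have h2 : List.dropWhile PySem.Int.isIntSpace l.reverse = l.reverse := by
    cases hr : l.reverse with
    | nil => rfl
    | cons c t =>
      rw [List.dropWhile_cons_of_neg
        (by simp [h c (by rw [← List.mem_reverse, hr]; exact List.mem_cons_self)])]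
  rw [h2, List.reverse_reverse]

theorem digit_not_space (c : Char) (h : c.isDigit = true) :
    PySem.Int.isIntSpace c = false := by
  revert h; unfold Char.isDigit PySem.Int.isIntSpace
  intro h
  simp only [decide_eq_true_eq, Bool.and_eq_true] at h
  simp only [Bool.or_eq_false_iff, decide_eq_false_iff_not]
  refine ⟨⟨⟨⟨⟨?_, ?_⟩, ?_⟩, ?_⟩, ?_⟩, ?_⟩ <;> (intro he; subst he; revert h; decide)

-- int(s) on a non-empty all-digit string is its parsed digit value
theorem ofChars_of_digits (cs : List Char) (hne : cs ≠ [])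
    (hdig : ∀ c ∈ cs, c.isDigit = true) (v : Nat) (hv : myDV? cs = some v) :
    PySem.Int.ofChars? cs = some (v : Int) := by
  rw [ofChars?_eq_my, myOfChars?]
  simp only [no_space_strip cs (fun c hc => digit_not_space c (hdig c hc))]
  cases cs with
  | nil => exact absurd rfl hne
  | cons c rest =>
    have hc : c.isDigit = true := hdig c List.mem_cons_self
    have hcm : c ≠ '-' ∧ c ≠ '+' := by
      revert hc; unfold Char.isDigit
      intro h; simp only [decide_eq_true_eq, Bool.and_eq_true] at h
      constructor <;> (intro he; subst he; revert h; decide)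
    split
    · next ds heq => exact absurd (List.head_eq_of_cons_eq heq) hcm.1
    · next ds heq => exact absurd (List.head_eq_of_cons_eq heq) hcm.2
    · rw [hv]; rfl

-- round-trip: int(str(m)) = m (used for the num < 9 branch, incl. negatives)
theorem ofChars_toChars (m : Int) : PySem.Int.ofChars? (PySem.Int.toChars m) = some m := by
  by_cases hm : m < 0
  · obtain ⟨hne, hdig, hval⟩ := toDigits_spec m.natAbs
    have hnosp : ∀ c ∈ ('-' :: Nat.toDigits 10 m.natAbs), PySem.Int.isIntSpace c = false := by
      intro c hc
      rcases List.mem_cons.1 hc with hc | hc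
      · subst hc; rfl
      · exact digit_not_space c (hdig c hc)
    rw [ofChars?_eq_my, PySem.Int.toChars, if_pos hm, myOfChars?]
    simp only [no_space_strip _ hnosp]
    rw [hval]
    simp
    rw [abs_of_neg hm, neg_neg]
  · obtain ⟨hne, hdig, hval⟩ := toDigits_spec m.toNat
    rw [PySem.Int.toChars, if_neg hm]
    rw [ofChars_of_digits _ hne hdig _ hval]
    simp only [Option.some.injEq]
    omega

-- str of a single remapped base-9 digit
theorem toChars_small (m : Int) (h0 : 0 ≤ m) (h10 : m < 10) :
    PySem.Int.toChars m = [Nat.digitChar m.toNat] ∧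
      (Nat.digitChar m.toNat).isDigit = true ∧
      (Nat.digitChar m.toNat).toNat - '0'.toNat = m.toNat := by
  interval_cases m <;> exact ⟨by decide, by decide, by decide⟩

theorem specF_nonneg (n : Int) (hn : 0 ≤ n) : 0 ≤ specF n := by
  induction hk : n.toNat using Nat.strong_induction_on generalizing n with
  | _ k ih =>
    rw [specF]
    split
    · split_ifs <;> omega
    · next h =>
      have h1 : 0 ≤ specF (n / 9) := ih (n / 9).toNat (by omega) _ (by omega) rfl
      split_ifs <;> omega

-- A's loop equals its digit string
theorem pyALoop_eq_Astr (n : Int) (hn : 0 ≤ n) : ∀ s, pyALoop n s = Astr n ++ s := by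
  induction hk : n.toNat using Nat.strong_induction_on generalizing n with
  | _ k ih =>
    intro s
    by_cases h9 : n < 9
    · rw [pyALoop, if_pos h9, Astr, if_pos h9]
    · rw [pyALoop, if_neg h9, Astr, if_neg h9,
        fdivP n 9 (by norm_num), fmodP n 9 (by norm_num)]
      rw [ih (n / 9).toNat (by omega) _ (by omega) rfl, List.append_assoc]

-- the digit string: non-empty, all digits, parsed value = specF
theorem Astr_spec (n : Int) (hn : 0 ≤ n) :
    Astr n ≠ [] ∧ (∀ c ∈ Astr n, c.isDigit = true) ∧
      ∀ acc : Nat, (Astr n).foldl (fun a c => a * 10 + (c.toNat - '0'.toNat)) acc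
        = acc * 10 ^ (Astr n).length + (specF n).toNat := by
  induction hk : n.toNat using Nat.strong_induction_on generalizing n with
  | _ k ih =>
    by_cases h9 : n < 9
    · have hA : Astr n = PySem.Int.toChars (if n = 8 then 5 else n) := by rw [Astr, if_pos h9]
      have hs : specF n = (if n = 8 then 5 else n) := by rw [specF, if_pos h9]
      have hd0 : (0:Int) ≤ (if n = 8 then 5 else n) := by split_ifs <;> omega
      have hd10 : (if n = 8 then 5 else n) < (10:Int) := by split_ifs <;> omega
      obtain ⟨h1, h2, h3⟩ := toChars_small _ hd0 hd10
      rw [hA, h1, hs]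
      refine ⟨by simp, by simpa using h2, fun acc => ?_⟩
      simp only [List.foldl_cons, List.foldl_nil, List.length_singleton, pow_one, h3]
    · have hq0 : 0 ≤ n / 9 := by omega
      obtain ⟨ih1, ih2, ih3⟩ := ih (n / 9).toNat (by omega) _ hq0 rfl
      have hA : Astr n = Astr (n / 9) ++ PySem.Int.toChars (if n % 9 = 8 then 5 else n % 9) := by
        rw [Astr, if_neg h9]
      have hs : specF n = specF (n / 9) * 10 + (if n % 9 = 8 then 5 else n % 9) := by
        rw [specF, if_neg h9]
      have hd0 : (0:Int) ≤ (if n % 9 = 8 then 5 else n % 9) := by split_ifs <;> omega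
      have hd10 : (if n % 9 = 8 then 5 else n % 9) < (10:Int) := by split_ifs <;> omega
      obtain ⟨h1, h2, h3⟩ := toChars_small _ hd0 hd10
      have hnn : 0 ≤ specF (n / 9) := specF_nonneg _ hq0
      have hvt : (specF n).toNat
          = (specF (n / 9)).toNat * 10 + ((if n % 9 = 8 then 5 else n % 9) : Int).toNat := by
        rw [hs]; omega
      rw [hA, h1]
      refine ⟨by simp, ?_, fun acc => ?_⟩
      · intro c hc
        rcases List.mem_append.1 hc with hc | hc
        · exact ih2 c hc
        · rw [List.mem_singleton] at hc; subst hc; exact h2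
      · rw [List.foldl_append, ih3 acc]
        simp only [List.foldl_cons, List.foldl_nil, List.length_append, List.length_singleton, h3]
        rw [hvt, pow_succ]
        ring

-- A's return value for n ≥ 0 is specF n
theorem baseA_eq_specF (n : Int) (hn : 0 ≤ n) : base_10_to_9 n = specF n := by
  obtain ⟨hne, hdig, hfold⟩ := Astr_spec n hn
  have hdv : myDV? (Astr n) = some (specF n).toNat := by
    cases hA : Astr n with
    | nil => exact absurd hA hne
    | cons c rest =>
      have h0 : myDV? (c :: rest) = myDVgo (c :: rest) false 0 := rfl
      rw [h0, myDVgo_digits_start _ _ (by simp) (by rw [← hA]; exact hdig)]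
      have := hfold 0
      rw [hA] at this
      rw [this]
      simp
  have hnn : 0 ≤ specF n := specF_nonneg n hn
  rw [base_10_to_9, pyALoop_eq_Astr n hn, List.append_nil,
    ofChars_of_digits _ hne hdig _ hdv]
  simp only [Option.getD_some]
  omega

-- ---------- B side ----------

-- the (k+1)-digit zero-padded remapped value of n in base 9
def padVal (n : Int) : Nat → Int
  | 0 => if n = 8 then 5 else n
  | Nat.succ k => padVal (n / 9) k * 10 + (if n % 9 = 8 then 5 else n % 9)

theorem padVal_zero : ∀ k, padVal 0 k = 0
  | 0 => by simp [padVal]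
  | Nat.succ k => by simp [padVal, padVal_zero k]

theorem specF_eq_padVal : ∀ (k : Nat) (n : Int), 0 ≤ n → n < 9 ^ (k + 1) → specF n = padVal n k := by
  intro k
  induction k with
  | zero =>
    intro n h0 h9
    rw [pow_one] at h9
    rw [specF, if_pos h9]
    rfl
  | succ k ih =>
    intro n h0 h9
    by_cases h : n < 9
    · rw [specF, if_pos h]
      show _ = padVal (n / 9) k * 10 + (if n % 9 = 8 then 5 else n % 9)
      have hq : n / 9 = 0 := by omega
      have hm : n % 9 = n := by omega
      rw [hq, hm, padVal_zero]
      simp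
    · rw [specF, if_neg h]
      show specF (n / 9) * 10 + _ = padVal (n / 9) k * 10 + _
      have hr1 : 0 ≤ n % 9 := Int.emod_nonneg n (by norm_num)
      have hid := Int.mul_ediv_add_emod n 9
      have h5 : 9 * (n / 9) < 9 * 9 ^ (k + 1) := by
        calc 9 * (n / 9) ≤ n := by omega
        _ < 9 ^ (k + 1 + 1) := h9
        _ = 9 * 9 ^ (k + 1) := by rw [pow_succ']
      have hq : n / 9 < 9 ^ (k + 1) := lt_of_mul_lt_mul_left h5 (by norm_num)
      rw [ih (n / 9) (by omega) hq]

-- (n % 9^(k+1)) / 9 = (n / 9) % 9^k for n ≥ 0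
theorem mod_div_swap (n : Int) (hn : 0 ≤ n) (k : Nat) :
    n % (9 * (9:Int) ^ k) / 9 = n / 9 % (9:Int) ^ k := by
  obtain ⟨a, rfl⟩ := Int.eq_ofNat_of_zero_le hn
  exact_mod_cast Nat.mod_mul_right_div_self a 9 (9 ^ k)

-- peel the most significant digit off padVal
theorem padVal_split (k : Nat) : ∀ (n : Int), 0 ≤ n →
    padVal n (k + 1)
      = (if n / 9 ^ (k + 1) = 8 then 5 else n / 9 ^ (k + 1)) * 10 ^ (k + 1)
        + padVal (n % 9 ^ (k + 1)) k := by
  induction k with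
  | zero =>
    intro n hn
    show padVal (n / 9) 0 * 10 + (if n % 9 = 8 then 5 else n % 9)
        = (if n / 9 ^ (0 + 1) = 8 then 5 else n / 9 ^ (0 + 1)) * 10 ^ (0 + 1)
          + padVal (n % 9 ^ (0 + 1)) 0
    simp only [zero_add, pow_one, padVal]
  | succ k ih =>
    intro n hn
    have e1 : n / 9 / 9 ^ (k + 1) = n / 9 ^ (k + 1 + 1) := by
      rw [Int.ediv_ediv_of_nonneg (by norm_num : (0:Int) ≤ 9), ← pow_succ']
    have e2 : n % 9 ^ (k + 1 + 1) / 9 = n / 9 % 9 ^ (k + 1) := by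
      have h := mod_div_swap n hn (k + 1)
      rwa [← pow_succ'] at h
    have e3 : n % 9 ^ (k + 1 + 1) % 9 = n % 9 :=
      Int.emod_emod_of_dvd n (dvd_pow_self 9 (Nat.succ_ne_zero (k + 1)))
    show padVal (n / 9) (k + 1) * 10 + (if n % 9 = 8 then 5 else n % 9)
        = (if n / 9 ^ (k + 1 + 1) = 8 then 5 else n / 9 ^ (k + 1 + 1)) * 10 ^ (k + 1 + 1)
          + (padVal (n % 9 ^ (k + 1 + 1) / 9) k * 10
            + (if n % 9 ^ (k + 1 + 1) % 9 = 8 then 5 else n % 9 ^ (k + 1 + 1) % 9))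
    rw [ih (n / 9) (Int.ediv_nonneg hn (by norm_num)), e1, e2, e3, pow_succ]
    ring

-- B's digit loop computes padVal
theorem pyBGo_spec : ∀ (k : Nat) (n r : Int), 0 ≤ n →
    pyBGo n ((9:Int) ^ k) r = r * 10 ^ (k + 1) + padVal n k := by
  intro k
  induction k with
  | zero =>
    intro n r hn
    rw [pyBGo]
    simp only [pow_zero, if_pos (by norm_num : (0:Int) < 1)]
    rw [fdivP n 1 (by norm_num), fmodP n 1 (by norm_num), fdivP 1 9 (by norm_num)]
    have h1 : n / 1 = n := Int.ediv_one n
    have h2 : n % 1 = 0 := Int.emod_one n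
    have h3 : (1:Int) / 9 = 0 := by decide
    rw [h1, h2, h3, pyBGo, if_neg (by norm_num)]
    show r * 10 + _ = r * 10 ^ 1 + padVal n 0
    rw [pow_one, padVal]
  | succ k ih =>
    intro n r hn
    have hp : (0:Int) < 9 ^ (k + 1) := by positivity
    rw [pyBGo, if_pos hp,
      fdivP n _ hp, fmodP n _ hp, fdivP _ 9 (by norm_num)]
    have hq : (9:Int) ^ (k + 1) / 9 = 9 ^ k := by
      rw [pow_succ, Int.mul_ediv_cancel _ (by norm_num)]
    rw [hq, ih (n % 9 ^ (k + 1)) _ (Int.emod_nonneg n (by positivity))]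
    rw [padVal_split k n hn, pow_succ]
    ring

-- B's power loop finds the scale
theorem pyBPow_spec (num p : Int) (hp : 0 < p) :
    ∃ k : Nat, pyBPow num p hp = p * 9 ^ k ∧ num < p * 9 ^ (k + 1) := by
  induction hm : (num + 1 - p).toNat using Nat.strong_induction_on generalizing p with
  | _ m ih =>
    rw [pyBPow]
    by_cases h : p * 9 ≤ num
    · rw [if_pos h]
      obtain ⟨k, h1, h2⟩ := ih (num + 1 - p * 9).toNat (by omega) (p * 9) (by omega) rfl
      refine ⟨k + 1, ?_, ?_⟩
      · rw [h1, pow_succ]; ring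
      · calc num < p * 9 * 9 ^ (k + 1) := h2
        _ = p * 9 ^ (k + 1 + 1) := by rw [pow_succ]; ring
    · rw [if_neg h]
      exact ⟨0, by simp, by rw [pow_one]; omega⟩

-- ===== VERDICT (by name: the statement is the Claim_ definition above) =====
theorem base_10_to_9_spec : Claim_equal_base_10_to_9 := by
  intro num _
  unfold Spec_base_10_to_9 base_10_to_9_alt
  by_cases h9 : num < 9
  · rw [if_pos h9, base_10_to_9, pyALoop, if_pos h9, List.append_nil, ofChars_toChars]
    rfl
  · rw [if_neg h9]
    obtain ⟨k, h1, h2⟩ := pyBPow_spec num 1 (by norm_num)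
    rw [one_mul] at h1 h2
    rw [h1, pyBGo_spec k num 0 (by omega), zero_mul, zero_add,
      ← specF_eq_padVal k num (by omega) h2]
    exact baseA_eq_specF num (by omega)
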